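-- pv_equiv track=rewrite | github.com/CielitoM/python-exercises | MATRICES/EJERCICIO 10 - SUMA DE MATRICES.PY | sumarElementosDeMatrizDosPorDos
-- ===== SOURCE A (Python) =====
-- def sumarElementosDeMatrizDosPorDos(MATRIZ):
--     SUMA = 0
--     FILAS = 2
--     COLUMNAS = 2
--     for FILA in range(FILAS):
--         for COLUMNA in range(COLUMNAS):
--             SUMA = SUMA + MATRIZ[FILA][COLUMNA]
--     return SUMA
-- ===== SOURCE B (Python) =====
-- def sumarElementosDeMatrizDosPorDos(MATRIZ):
--     return MATRIZ[0][0] + MATRIZ[0][1] + MATRIZ[1][0] + MATRIZ[1][1]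
-- ===== Notes on version B (the rewrite author's own statement) =====
-- stated objective: simpler
-- what changed: Replaced the nested 2x2 loop with accumulator by a single closed-form expression adding the four fixed elements.
import Mathlib
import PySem

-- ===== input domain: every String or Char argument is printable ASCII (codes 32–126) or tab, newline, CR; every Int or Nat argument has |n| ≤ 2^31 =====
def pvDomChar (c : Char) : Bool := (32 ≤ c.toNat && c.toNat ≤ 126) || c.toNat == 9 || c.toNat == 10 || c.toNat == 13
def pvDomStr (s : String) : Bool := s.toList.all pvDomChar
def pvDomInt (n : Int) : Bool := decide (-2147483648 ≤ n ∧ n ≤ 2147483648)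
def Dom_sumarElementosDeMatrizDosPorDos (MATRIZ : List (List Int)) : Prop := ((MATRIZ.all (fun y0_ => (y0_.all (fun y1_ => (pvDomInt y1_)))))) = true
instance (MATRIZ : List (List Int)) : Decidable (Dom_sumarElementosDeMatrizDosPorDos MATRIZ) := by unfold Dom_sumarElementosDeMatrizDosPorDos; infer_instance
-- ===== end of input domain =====

-- B replaces the nested loops by one closed-form sum of the four fixed elements (objective: simpler).

-- ===== PORT A =====
-- nested 'for FILA in range(2): for COLUMNA in range(2): SUMA += MATRIZ[FILA][COLUMNA]'
def sumarElementosDeMatrizDosPorDos (MATRIZ : List (List Int)) : Int :=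
  (PySem.List.pyRange 0 2 1).foldl
    (fun SUMA FILA =>
      (PySem.List.pyRange 0 2 1).foldl
        (fun SUMA COLUMNA => SUMA + PySem.List.pyGetD (PySem.List.pyGetD MATRIZ FILA []) COLUMNA 0)
        SUMA)
    0

-- ===== PORT B =====
def sumarElementosDeMatrizDosPorDos_alt (MATRIZ : List (List Int)) : Int :=
  PySem.List.pyGetD (PySem.List.pyGetD MATRIZ 0 []) 0 0
  + PySem.List.pyGetD (PySem.List.pyGetD MATRIZ 0 []) 1 0
  + PySem.List.pyGetD (PySem.List.pyGetD MATRIZ 1 []) 0 0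
  + PySem.List.pyGetD (PySem.List.pyGetD MATRIZ 1 []) 1 0

-- ===== PRECONDITION & SPEC =====
-- A raises IndexError unless the matrix has at least 2 rows whose first two rows each have at least 2 entries.
def Pre_sumarElementosDeMatrizDosPorDos (MATRIZ : List (List Int)) : Prop :=
  2 ≤ MATRIZ.length ∧ 2 ≤ (MATRIZ.getD 0 []).length ∧ 2 ≤ (MATRIZ.getD 1 []).length
instance (MATRIZ : List (List Int)) : Decidable (Pre_sumarElementosDeMatrizDosPorDos MATRIZ) := by unfold Pre_sumarElementosDeMatrizDosPorDos; infer_instance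

def pvWitness_sumarElementosDeMatrizDosPorDos : List (List Int) := [[1, 2], [3, 4]]

def Spec_sumarElementosDeMatrizDosPorDos (MATRIZ : List (List Int)) (out : Int) : Prop := out = sumarElementosDeMatrizDosPorDos_alt MATRIZ
instance (MATRIZ : List (List Int)) (out : Int) : Decidable (Spec_sumarElementosDeMatrizDosPorDos MATRIZ out) := by unfold Spec_sumarElementosDeMatrizDosPorDos; infer_instance

-- ===== CLAIM (what is proved, stated in full; the proofs are below) =====
def Claim_equal_sumarElementosDeMatrizDosPorDos : Prop := ∀ (MATRIZ : List (List Int)), Dom_sumarElementosDeMatrizDosPorDos MATRIZ → Pre_sumarElementosDeMatrizDosPorDos MATRIZ → Spec_sumarElementosDeMatrizDosPorDos MATRIZ (sumarElementosDeMatrizDosPorDos MATRIZ)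

-- ===== LEMMAS AND PROOFS =====

-- ===== VERDICT (by name: the statement is the Claim_ definition above) =====
theorem sumarElementosDeMatrizDosPorDos_spec : Claim_equal_sumarElementosDeMatrizDosPorDos := by
  intro MATRIZ _ hpre
  unfold Spec_sumarElementosDeMatrizDosPorDos
  obtain ⟨h1, h2, h3⟩ := hpre
  match MATRIZ, h1 with
  | r0 :: r1 :: rest, _ =>
    simp only [List.getD, List.getElem?_cons_zero, List.getElem?_cons_succ, Option.getD_some] at h2 h3
    match r0, h2, r1, h3 with
    | a :: b :: t0, _, c :: d :: t1, _ =>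
      have hr : PySem.List.pyRange 0 2 1 = [0, 1] := by decide
      simp only [sumarElementosDeMatrizDosPorDos, sumarElementosDeMatrizDosPorDos_alt, hr,
        List.foldl_cons, List.foldl_nil]
      have g0 : PySem.List.pyGetD ((a :: b :: t0) :: (c :: d :: t1) :: rest) 0 [] = a :: b :: t0 :=
        PySem.List.pyGetD_zero_cons _ _ _
      have g1 : PySem.List.pyGetD ((a :: b :: t0) :: (c :: d :: t1) :: rest) 1 [] = c :: d :: t1 := by
        have := PySem.List.pyGetD_eq_getElem (i := 1) ((a :: b :: t0) :: (c :: d :: t1) :: rest) []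
          (by omega) (by simp)
        simpa using this
      have e0 : ∀ (x y : Int) (t : List Int),
          PySem.List.pyGetD (x :: y :: t) 1 0 = y := by
        intro x y t
        have := PySem.List.pyGetD_eq_getElem (i := 1) (x :: y :: t) 0 (by omega) (by simp)
        simpa using this
      rw [g0, g1]
      rw [PySem.List.pyGetD_zero_cons, PySem.List.pyGetD_zero_cons, e0 a b t0, e0 c d t1]
      ring
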